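-- pv_equiv track=rewrite | github.com/SA-to-MA/nyx-extension | MA-PDDL/MAtoSA_Domain.py | generate_joint_actions
-- ===== SOURCE A (Python) =====
-- import itertools
--
-- def generate_joint_actions(action_combinations, total_agents):
--     """
--     Generate all possible joint actions based on the given action combinations
--     while ensuring no intersection of parameters across actions.
--
--     :param action_combinations: A dictionary of actions and their parameter combinations.
--     :param total_agents: Total number of agents in the system.
--     :return: A list of valid joint action combinations.
--     """
--     # Collect all possible actions for each agent
--     all_possible_actions = [
--         (action_name, params) for action_name, combinations in action_combinations.items()
--         for params in combinations
--     ]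
--
--     # Generate all possible joint action combinations for the number of agents
--     joint_combinations = itertools.combinations(all_possible_actions, total_agents)
--
--     valid_joint_actions = []
--
--     for joint_action in joint_combinations:
--         # Collect all agents and objects used in the joint action
--         used_agents = set()
--         used_objects = set()
--         is_valid = True
--
--         for action_name, params in joint_action:
--             agent = params[0]
--             objects = params[1:]
--
--             # Check if the agent or objects are already used
--             if agent in used_agents or any(obj in used_objects for obj in objects):
--                 is_valid = False
--                 break
--
--             # Add the agent and objects to the used sets
--             used_agents.add(agent)
--             used_objects.update(objects)
--
--         if is_valid:
--             valid_joint_actions.append(joint_action)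
--
--     return valid_joint_actions
-- ===== SOURCE B (Python) =====
-- def generate_joint_actions(action_combinations, total_agents):
--     """
--     Backtracking enumeration of valid joint actions: extend partial joint
--     actions in index order, pruning a branch as soon as an agent or object
--     conflict appears (instead of generating every combination and filtering).
--     """
--     pool = [
--         (action_name, params)
--         for action_name, combinations in action_combinations.items()
--         for params in combinations
--     ]
--
--     results = []
--
--     def search(items, remaining, chosen, used_agents, used_objects):
--         if remaining == 0:
--             results.append(tuple(chosen))
--             return
--         if len(items) < remaining:
--             return
--         head, rest = items[0], items[1:]
--         name, params = head
--         agent = params[0]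
--         objects = params[1:]
--         if agent not in used_agents and not any(o in used_objects for o in objects):
--             # include head, with its agent/objects now marked used
--             search(rest, remaining - 1, chosen + [head],
--                    used_agents.union([agent]), used_objects.union(objects))
--         # skip head
--         search(rest, remaining, chosen, used_agents, used_objects)
--
--     search(pool, total_agents, [], set(), set())
--     return results
-- ===== Notes on version B (the rewrite author's own statement) =====
-- stated objective: alternative
-- what changed: Replaces 'materialize all C(n,k) combinations via itertools and filter each one' with a recursive backtracking search (include/skip head) that extends partial joint actions in index order and abandons a branch at the first agent/object conflict, so conflicting prefixes are never expanded.
-- outside the precondition, e.g. on generate_joint_actions({'n1': [('x',)], 'n2': [('x',)], 'n3': [()]}, 3): A returns [], B returns []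
import Mathlib
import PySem

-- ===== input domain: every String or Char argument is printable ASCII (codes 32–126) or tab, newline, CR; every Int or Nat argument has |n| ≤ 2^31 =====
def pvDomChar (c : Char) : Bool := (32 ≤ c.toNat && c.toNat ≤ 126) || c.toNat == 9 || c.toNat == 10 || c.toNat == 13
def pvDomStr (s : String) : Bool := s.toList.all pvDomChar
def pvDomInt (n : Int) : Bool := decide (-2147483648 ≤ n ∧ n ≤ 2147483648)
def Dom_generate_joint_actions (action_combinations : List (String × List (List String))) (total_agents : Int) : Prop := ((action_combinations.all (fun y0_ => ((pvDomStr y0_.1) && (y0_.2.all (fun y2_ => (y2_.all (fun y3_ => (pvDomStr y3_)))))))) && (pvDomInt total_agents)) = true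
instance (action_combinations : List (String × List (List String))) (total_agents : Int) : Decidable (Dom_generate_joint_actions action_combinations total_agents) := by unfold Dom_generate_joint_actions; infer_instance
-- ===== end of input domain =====

-- B replaces "enumerate all C(n,k) combinations then filter" by a backtracking search that
-- prunes a partial joint action at the first agent/object conflict (alternative algorithm;
-- same results in the same order).


-- ===== PORT A =====
-- itertools.combinations(l, k), in itertools' order
def pvCombos {α : Type} : Nat → List α → List (List α)
  | 0, _ => [[]]
  | _ + 1, [] => []
  | k + 1, x :: xs => (pvCombos k xs).map (fun c => x :: c) ++ pvCombos (k + 1) xs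

-- A's inner validity loop (sequential check with used_agents / used_objects sets)
def pvCheck : List (String × List String) → PySem.Set String → PySem.Set String → Bool
  | [], _, _ => true
  | (_, params) :: rest, ua, uo =>
    match params with
    | [] => false  -- Python: params[0] raises IndexError here; such inputs are outside Pre_
    | agent :: objects =>
      if ua.contains agent || objects.any (fun o => uo.contains o) then false
      else pvCheck rest (PySem.Set.add ua agent) (PySem.Set.update uo objects)

def generate_joint_actions (action_combinations : List (String × List (List String))) (total_agents : Int) : List (List (String × List String)) :=
  let all_possible := action_combinations.flatMap (fun ac => ac.2.map (fun params => (ac.1, params)))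
  -- itertools.combinations raises ValueError for a negative r; guard for totality (outside Pre_)
  if total_agents < 0 then []
  else (pvCombos total_agents.toNat all_possible).filter
        (fun c => pvCheck c PySem.Set.empty PySem.Set.empty)

-- ===== PORT B =====
-- B's recursive backtracking search (include head / skip head), pruning on first conflict
def pvSearch : Nat → List (String × List String) → List (String × List String) → PySem.Set String → PySem.Set String → List (List (String × List String))
  | 0, _, chosen, _, _ => [chosen]
  | r + 1, items, chosen, ua, uo =>
    if items.length < r + 1 then []
    else
      match items with
      | [] => []  -- unreachable: items.length < r + 1 is false forces items ≠ []
      | (name, params) :: rest =>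
        (match params with
         | [] => []  -- Python: params[0] raises IndexError here; such inputs are outside Pre_
         | agent :: objects =>
           if !(PySem.Set.contains ua agent) && !(objects.any (fun o => PySem.Set.contains uo o)) then
             pvSearch r rest (chosen ++ [(name, params)])
               (PySem.Set.union ua [agent]) (PySem.Set.union uo objects)
           else []) ++
        pvSearch (r + 1) rest chosen ua uo

def generate_joint_actions_alt (action_combinations : List (String × List (List String))) (total_agents : Int) : List (List (String × List String)) :=
  let pool := action_combinations.flatMap (fun ac => ac.2.map (fun params => (ac.1, params)))
  -- Python B raises IndexError for a negative count; guard for totality (outside Pre_)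
  if total_agents < 0 then []
  else pvSearch total_agents.toNat pool [] PySem.Set.empty PySem.Set.empty

-- ===== PRECONDITION & SPEC =====
-- Pre_ excludes negative total_agents (A raises ValueError there) and inputs containing an
-- empty parameter tuple when there are at least total_agents parameter tuples overall, on
-- which A's validity loop may hit params[0] and raise IndexError.
def Pre_generate_joint_actions (action_combinations : List (String × List (List String))) (total_agents : Int) : Prop :=
  0 ≤ total_agents ∧
  ((∀ ac ∈ action_combinations, ∀ params ∈ ac.2, params ≠ []) ∨
   ((action_combinations.flatMap (fun ac => ac.2)).length : Int) < total_agents)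
instance (action_combinations : List (String × List (List String))) (total_agents : Int) : Decidable (Pre_generate_joint_actions action_combinations total_agents) := by unfold Pre_generate_joint_actions; infer_instance

def pvWitness_generate_joint_actions : (List (String × List (List String))) × Int :=
  ([("move", [["a1", "x"], ["a2", "y"]]), ("wait", [["a1"]])], 2)

def Spec_generate_joint_actions (action_combinations : List (String × List (List String))) (total_agents : Int) (out : List (List (String × List String))) : Prop := out = generate_joint_actions_alt action_combinations total_agents
instance (action_combinations : List (String × List (List String))) (total_agents : Int) (out : List (List (String × List String))) : Decidable (Spec_generate_joint_actions action_combinations total_agents out) := by unfold Spec_generate_joint_actions; infer_instance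

-- ===== CLAIM (what is proved, stated in full; the proofs are below) =====
def Claim_equal_generate_joint_actions : Prop := ∀ (action_combinations : List (String × List (List String))) (total_agents : Int), Dom_generate_joint_actions action_combinations total_agents → Pre_generate_joint_actions action_combinations total_agents → Spec_generate_joint_actions action_combinations total_agents (generate_joint_actions action_combinations total_agents)

-- ===== LEMMAS AND PROOFS =====
theorem pvCombos_eq_nil_of_lt {α : Type} : ∀ (l : List α) (k : Nat), l.length < k → pvCombos k l = [] := by
  intro l
  induction l with
  | nil => intro k hk; cases k with
    | zero => omega
    | succ s => rfl
  | cons x xs ih =>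
    intro k hk
    cases k with
    | zero => omega
    | succ s =>
      have h1 : pvCombos s xs = [] := ih s (by simpa using hk)
      have h2 : pvCombos (s + 1) xs = [] := ih (s + 1) (by simp at hk ⊢; omega)
      show (pvCombos s xs).map (fun c => x :: c) ++ pvCombos (s + 1) xs = []
      rw [h1, h2]
      simp

theorem pvSet_union_single (s : PySem.Set String) (x : String) :
    PySem.Set.union s [x] = PySem.Set.add s x := rfl

theorem pvSet_union_eq_update (s : PySem.Set String) (t : List String) :
    PySem.Set.union s t = PySem.Set.update s t := rfl

theorem pvSearch_eq : ∀ (items : List (String × List String)) (r : Nat)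
    (chosen : List (String × List String)) (ua uo : PySem.Set String),
    pvSearch r items chosen ua uo =
      ((pvCombos r items).filter (fun c => pvCheck c ua uo)).map (fun c => chosen ++ c) := by
  intro items
  induction items with
  | nil =>
    intro r chosen ua uo
    cases r with
    | zero => simp [pvSearch, pvCombos, pvCheck]
    | succ s => simp [pvSearch, pvCombos]
  | cons x rest ih =>
    intro r chosen ua uo
    obtain ⟨name, params⟩ := x
    cases r with
    | zero => simp [pvSearch, pvCombos, pvCheck]
    | succ s =>
      by_cases hlen : ((name, params) :: rest).length < s + 1
      · have h1 : pvCombos s rest = [] := pvCombos_eq_nil_of_lt rest s (by simp at hlen ⊢; omega)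
        have h2 : pvCombos (s + 1) rest = [] := pvCombos_eq_nil_of_lt rest (s + 1) (by simp at hlen ⊢; omega)
        rw [show pvSearch (s + 1) ((name, params) :: rest) chosen ua uo = [] by
              simp only [pvSearch]; rw [if_pos hlen]]
        simp [pvCombos, h1, h2]
      · cases params with
        | nil =>
          have hB : pvSearch (s + 1) ((name, ([] : List String)) :: rest) chosen ua uo =
              [] ++ pvSearch (s + 1) rest chosen ua uo := by
            simp only [pvSearch]; rw [if_neg hlen]
          rw [hB, ih]
          simp only [pvCombos, List.filter_append, List.filter_map, List.map_append]
          have hnil : (List.filter ((fun c => pvCheck c ua uo) ∘ fun c => (name, ([] : List String)) :: c) (pvCombos s rest)) = [] := by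
            simp [Function.comp, pvCheck]
          rw [hnil]
          simp
        | cons agent objects =>
          have hB : pvSearch (s + 1) ((name, agent :: objects) :: rest) chosen ua uo =
              (if !(PySem.Set.contains ua agent) && !(objects.any (fun o => PySem.Set.contains uo o)) then
                 pvSearch s rest (chosen ++ [(name, agent :: objects)])
                   (PySem.Set.union ua [agent]) (PySem.Set.union uo objects)
               else []) ++
              pvSearch (s + 1) rest chosen ua uo := by
            simp only [pvSearch]; rw [if_neg hlen]
          rw [hB]
          rw [show (if !(PySem.Set.contains ua agent) && !(objects.any (fun o => PySem.Set.contains uo o)) then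
                 pvSearch s rest (chosen ++ [(name, agent :: objects)])
                   (PySem.Set.union ua [agent]) (PySem.Set.union uo objects)
               else []) = (if (PySem.Set.contains ua agent || objects.any (fun o => PySem.Set.contains uo o)) then ([] : List (List (String × List String))) else
                 pvSearch s rest (chosen ++ [(name, agent :: objects)])
                   (PySem.Set.add ua agent) (PySem.Set.update uo objects)) by
            rw [pvSet_union_single, pvSet_union_eq_update]
            cases hca : PySem.Set.contains ua agent <;> cases hco : objects.any (fun o => PySem.Set.contains uo o) <;> simp]
          simp only [pvCombos, List.filter_append, List.map_append]
          by_cases hc : (PySem.Set.contains ua agent || objects.any (fun o => PySem.Set.contains uo o)) = true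
          · rw [if_pos hc, ih]
            have hfil : (List.filter (fun c => pvCheck c ua uo) (List.map (fun c => (name, agent :: objects) :: c) (pvCombos s rest))) = [] := by
              simp only [List.filter_map]
              have heq : ((fun c => pvCheck c ua uo) ∘ fun c => (name, agent :: objects) :: c) = fun _ => false := by
                funext c; simp only [Function.comp, pvCheck]; rw [if_pos hc]
              rw [heq]; simp
            rw [hfil]; simp
          · rw [if_neg hc, ih, ih]
            have hfil : (List.filter (fun c => pvCheck c ua uo) (List.map (fun c => (name, agent :: objects) :: c) (pvCombos s rest))) =
                List.map (fun c => (name, agent :: objects) :: c)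
                  (List.filter (fun c => pvCheck c (PySem.Set.add ua agent) (PySem.Set.update uo objects)) (pvCombos s rest)) := by
              simp only [List.filter_map]
              refine congrArg _ (List.filter_congr ?_)
              intro c _; simp only [Function.comp, pvCheck]
              rw [if_neg hc]
            rw [hfil]
            simp [List.map_map, Function.comp, List.append_assoc]

-- ===== VERDICT (by name: the statement is the Claim_ definition above) =====
theorem generate_joint_actions_spec : Claim_equal_generate_joint_actions := by
  unfold Claim_equal_generate_joint_actions
  intro acs t _hdom hpre
  unfold Spec_generate_joint_actions generate_joint_actions generate_joint_actions_alt
  have hneg : ¬ t < 0 := not_lt.mpr hpre.1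
  rw [if_neg hneg, if_neg hneg, pvSearch_eq]
  simp
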